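-- pv_equiv track=rewrite | github.com/ishreya09/Stemkit-Math | api/modules/polynomial.py | getPowers
-- ===== SOURCE A (Python) =====
-- def getPowers(str):
--     """
--     returns the tuple of powers of each term
--     eg - xyz returns [1,1,1]
--     x^2y^3 - returns [2,3]
--     """
--     i = 1
--     while(i < len(str) and str[i].isdigit()):
--         i += 1
--
--     if(i < len(str) and str[i].isalpha()):
--         deg = []
--         while(i<len(str) and str[i].isalpha()):
--             i += 1
--             if (i<len(str) and str[i] == '^'):
--                 i+=1
--                 p = "0"
--                 while(i<len(str) and str[i].isdigit()):
--                     p += str[i]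
--                     i += 1
--                 deg.append(int(p))
--             else:
--                 deg.append(1)
--         return deg
--     else:
--         return [0]
-- ===== SOURCE B (Python) =====
-- def getPowers(str):
--     powers = []
--     state = 0          # 0: skipping leading digits, 1: letter pending, 2: reading a power
--     p = '0'
--     for ch in str[1:]:
--         if state == 0:
--             if ch.isdigit():
--                 continue
--             if not ch.isalpha():
--                 return [0]
--             state = 1
--         elif state == 1:
--             if ch == '^':
--                 p = '0'
--                 state = 2
--             elif ch.isalpha():
--                 powers.append(1)
--             else:
--                 powers.append(1)
--                 return powers
--         else:
--             if ch.isdigit():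
--                 p += ch
--             elif ch.isalpha():
--                 powers.append(int(p))
--                 state = 1
--             else:
--                 powers.append(int(p))
--                 return powers
--     if state == 0:
--         return [0]
--     powers.append(1 if state == 1 else int(p))
--     return powers
-- ===== Notes on version B (the rewrite author's own statement) =====
-- stated objective: alternative
-- what changed: Replaces A's nested index-based while loops (digit skip, letter loop, inner power loop) with a single linear pass over the characters driven by an explicit 3-state machine (skip digits / letter pending / reading a power) with an accumulator.
import Mathlib
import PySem

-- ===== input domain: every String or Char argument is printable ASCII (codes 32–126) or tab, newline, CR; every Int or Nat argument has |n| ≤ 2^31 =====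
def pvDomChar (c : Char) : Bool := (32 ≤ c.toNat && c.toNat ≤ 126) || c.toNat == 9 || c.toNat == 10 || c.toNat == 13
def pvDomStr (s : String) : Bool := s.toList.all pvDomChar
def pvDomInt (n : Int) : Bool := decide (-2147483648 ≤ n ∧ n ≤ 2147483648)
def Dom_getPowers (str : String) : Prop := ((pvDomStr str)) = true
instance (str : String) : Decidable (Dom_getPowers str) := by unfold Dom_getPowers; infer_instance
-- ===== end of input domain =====

-- B replaces A's nested index-based while loops by one linear pass with an explicit 3-state machine.

-- int(p) where p is always "0" followed by digits, so int() succeeds; both Pythons build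
-- exactly this string and call int on it, so both ports use this helper.
def intP (p : List Char) : Int := (PySem.Int.ofChars? p).getD 0

-- ===== PORT A =====
-- while(i < len(str) and str[i].isdigit()): i += 1
def aSkip (cs : List Char) (i : Nat) : Nat :=
  if i < cs.length ∧ (cs.getD i ' ').isDigit then aSkip cs (i + 1) else i
termination_by cs.length - i

-- inner power loop: p = "0"; while digit: p += str[i]; i += 1 — returns (p, i)
def aPow (cs : List Char) (i : Nat) (p : List Char) : List Char × Nat :=
  if i < cs.length ∧ (cs.getD i ' ').isDigit then aPow cs (i + 1) (p ++ [cs.getD i ' ']) else (p, i)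
termination_by cs.length - i

theorem aPow_le (cs : List Char) (i : Nat) (p : List Char) : i ≤ (aPow cs i p).2 := by
  unfold aPow
  split
  · exact le_trans (by omega) (aPow_le cs (i + 1) _)
  · exact le_refl i
termination_by cs.length - i

-- outer loop: while alpha: i += 1; if '^': consume digits, append int(p) else append 1
def aLoop (cs : List Char) (i : Nat) : List Int :=
  if i < cs.length ∧ (cs.getD i ' ').isAlpha then
    if i + 1 < cs.length ∧ cs.getD (i + 1) ' ' = '^' then
      let pr := aPow cs (i + 2) ['0']
      intP pr.1 :: aLoop cs pr.2
    else
      1 :: aLoop cs (i + 1)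
  else []
termination_by cs.length - i
decreasing_by
  · have := aPow_le cs (i + 2) ['0']; omega
  · omega

def getPowers (str : String) : List Int :=
  let cs := str.toList
  let i := aSkip cs 1
  if i < cs.length ∧ (cs.getD i ' ').isAlpha then aLoop cs i else [0]

-- ===== PORT B =====
-- the state variable: 0 = skipping leading digits, 1 = letter pending, 2 = reading a power (carrying p)
inductive PState where
  | skip : PState
  | letter : PState
  | power : List Char → PState

-- the for-loop over str[1:]; early 'return' = stop recursing; the [] case is the post-loop code
def bLoop : List Char → PState → List Int → List Int
  | [], .skip, _ => [0]
  | [], .letter, acc => acc ++ [1]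
  | [], .power p, acc => acc ++ [intP p]
  | c :: rest, .skip, acc =>
    if c.isDigit then bLoop rest .skip acc
    else if c.isAlpha then bLoop rest .letter acc
    else [0]
  | c :: rest, .letter, acc =>
    if c = '^' then bLoop rest (.power ['0']) acc
    else if c.isAlpha then bLoop rest .letter (acc ++ [1])
    else acc ++ [1]
  | c :: rest, .power p, acc =>
    if c.isDigit then bLoop rest (.power (p ++ [c])) acc
    else if c.isAlpha then bLoop rest .letter (acc ++ [intP p])
    else acc ++ [intP p]

def getPowers_alt (str : String) : List Int := bLoop str.toList.tail .skip []

-- ===== PRECONDITION & SPEC =====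
def Spec_getPowers (str : String) (out : List Int) : Prop := out = getPowers_alt str
instance (str : String) (out : List Int) : Decidable (Spec_getPowers str out) := by unfold Spec_getPowers; infer_instance

-- ===== CLAIM (what is proved, stated in full; the proofs are below) =====
def Claim_equal_getPowers : Prop := ∀ (str : String), Dom_getPowers str → Spec_getPowers str (getPowers str)

-- ===== LEMMAS AND PROOFS =====

theorem drop_cons (cs : List Char) (i : Nat) (h : i < cs.length) :
    cs.drop i = cs.getD i ' ' :: cs.drop (i + 1) := by
  rw [List.drop_eq_getElem_cons h, List.getD_eq_getElem cs ' ' h]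

-- what A appends after having consumed one letter, the position now being i
def aAfterLetter (cs : List Char) (i : Nat) : List Int :=
  if i < cs.length ∧ cs.getD i ' ' = '^' then
    intP (aPow cs (i + 1) ['0']).1 :: aLoop cs (aPow cs (i + 1) ['0']).2
  else 1 :: aLoop cs i

theorem aLoop_after (cs : List Char) (i : Nat)
    (h : i < cs.length ∧ (cs.getD i ' ').isAlpha) :
    aLoop cs i = aAfterLetter cs (i + 1) := by
  rw [aLoop, if_pos h, aAfterLetter]

theorem aLoop_stop (cs : List Char) (i : Nat)
    (h : ¬ (i < cs.length ∧ (cs.getD i ' ').isAlpha = true)) :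
    aLoop cs i = [] := by
  rw [aLoop, if_neg h]

-- A's value for the rest of the scan, indexed by B's machine state
def runResult (cs : List Char) (i : Nat) (st : PState) (acc : List Int) : List Int :=
  match st with
  | .skip =>
    if aSkip cs i < cs.length ∧ (cs.getD (aSkip cs i) ' ').isAlpha then
      acc ++ aLoop cs (aSkip cs i)
    else [0]
  | .letter => acc ++ aAfterLetter cs i
  | .power p => acc ++ (intP (aPow cs i p).1 :: aLoop cs (aPow cs i p).2)

theorem run_eq (cs : List Char) (i : Nat) (st : PState) (acc : List Int) :
    bLoop (cs.drop i) st acc = runResult cs i st acc := by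
  by_cases hi : i < cs.length
  · rw [drop_cons cs i hi]
    cases st with
    | skip =>
      simp only [bLoop, runResult]
      by_cases hd : (cs.getD i ' ').isDigit = true
      · rw [if_pos hd, run_eq cs (i + 1) .skip acc]
        rw [show aSkip cs i = aSkip cs (i + 1) from by rw [aSkip, if_pos ⟨hi, hd⟩]]
        rfl
      · have hs : aSkip cs i = i := by rw [aSkip, if_neg (fun hc => hd hc.2)]
        rw [if_neg hd]
        by_cases ha : (cs.getD i ' ').isAlpha = true
        · rw [if_pos ha, run_eq cs (i + 1) .letter acc, hs, if_pos ⟨hi, ha⟩,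
            aLoop_after cs i ⟨hi, ha⟩]
          rfl
        · rw [if_neg ha, hs, if_neg (fun hc => ha hc.2)]
    | letter =>
      simp only [bLoop, runResult, aAfterLetter]
      by_cases hc : cs.getD i ' ' = '^'
      · rw [if_pos hc, run_eq cs (i + 1) (.power ['0']) acc, if_pos ⟨hi, hc⟩]
        rfl
      · rw [if_neg hc,
          if_neg (show ¬ (i < cs.length ∧ cs.getD i ' ' = '^') from fun hh => hc hh.2)]
        by_cases ha : (cs.getD i ' ').isAlpha = true
        · rw [if_pos ha, run_eq cs (i + 1) .letter (acc ++ [1]),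
            aLoop_after cs i ⟨hi, ha⟩]
          simp [runResult]
        · rw [if_neg ha, aLoop_stop cs i (fun hh => ha hh.2)]
    | power p =>
      simp only [bLoop, runResult]
      by_cases hd : (cs.getD i ' ').isDigit = true
      · rw [if_pos hd, run_eq cs (i + 1) (.power (p ++ [cs.getD i ' '])) acc]
        rw [show aPow cs i p = aPow cs (i + 1) (p ++ [cs.getD i ' ']) from by
          rw [aPow, if_pos ⟨hi, hd⟩]]
        rfl
      · have hp : aPow cs i p = (p, i) := by rw [aPow, if_neg (fun hc => hd hc.2)]
        rw [if_neg hd, hp]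
        by_cases ha : (cs.getD i ' ').isAlpha = true
        · rw [if_pos ha, run_eq cs (i + 1) .letter (acc ++ [intP p]),
            aLoop_after cs i ⟨hi, ha⟩]
          simp [runResult]
        · rw [if_neg ha, aLoop_stop cs i (fun hh => ha hh.2)]
  · rw [List.drop_eq_nil_of_le (by omega)]
    cases st with
    | skip =>
      have hs : aSkip cs i = i := by rw [aSkip, if_neg (fun hc => hi hc.1)]
      simp only [bLoop, runResult, hs, if_neg (fun hc => hi (hc : _ ∧ _).1)]
    | letter =>
      simp only [bLoop, runResult, aAfterLetter,
        if_neg (show ¬ (i < cs.length ∧ cs.getD i ' ' = '^') from fun hc => hi hc.1),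
        aLoop_stop cs i (fun hc => hi hc.1)]
    | power p =>
      have hp : aPow cs i p = (p, i) := by rw [aPow, if_neg (fun hc => hi hc.1)]
      simp only [bLoop, runResult, hp, aLoop_stop cs i (fun hc => hi hc.1)]
termination_by cs.length - i
decreasing_by all_goals omega

-- ===== VERDICT (by name: the statement is the Claim_ definition above) =====
theorem getPowers_spec : Claim_equal_getPowers := by
  intro str _
  unfold Spec_getPowers getPowers getPowers_alt
  rw [← List.drop_one, run_eq str.toList 1 .skip []]
  simp only [runResult, List.nil_append]
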